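-- pv_equiv track=rewrite | github.com/geekeedoomboruto/MaMaPy | COMP.py | stringbefore
-- ===== SOURCE A (Python) =====
-- def stringbefore(string, indexof):
--     if not '"' in string:
--         return False
--     else:
--         for i in string:
--             if i == '"' and string.index(i) < indexof:
--                 return True
--         return False
-- ===== SOURCE B (Python) =====
-- def stringbefore(string, indexof):
--     return '"' in string and string.index('"') < indexof
-- ===== Notes on version B (the rewrite author's own statement) =====
-- stated objective: simpler
-- what changed: Replaced the per-character loop that re-runs string.index on every iteration with a single membership test plus one first-occurrence lookup.
import Mathlib
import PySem

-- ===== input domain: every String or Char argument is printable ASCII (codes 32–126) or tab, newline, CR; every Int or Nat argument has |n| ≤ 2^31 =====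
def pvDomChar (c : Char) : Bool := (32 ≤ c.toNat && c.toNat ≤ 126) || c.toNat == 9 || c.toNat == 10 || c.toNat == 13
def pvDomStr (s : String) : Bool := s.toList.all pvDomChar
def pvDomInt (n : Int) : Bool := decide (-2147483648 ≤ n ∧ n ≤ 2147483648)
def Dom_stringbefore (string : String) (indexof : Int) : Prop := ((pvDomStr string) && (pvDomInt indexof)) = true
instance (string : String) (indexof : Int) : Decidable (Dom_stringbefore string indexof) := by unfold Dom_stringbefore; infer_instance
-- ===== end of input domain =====

-- B replaces A's per-character loop (which re-runs index each iteration) with one membership test and one first-index lookup: simpler.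


-- ===== PORT A =====
-- loop of A: for i in string: if i == '"' and string.index(i) < indexof: return True; else fall through to False.
-- string.index(i) is PySem.List.index? on the full string; i is always a member, so index? is some (the .getD 0
-- default is never used).
def stringbeforeLoop (full : List Char) (indexof : Int) : List Char → Bool
  | [] => false
  | c :: rest =>
      if c = '"' ∧ ((PySem.List.index? full c).getD 0 : Int) < indexof then true
      else stringbeforeLoop full indexof rest

def stringbefore (string : String) (indexof : Int) : Bool :=
  if ¬ ('"' ∈ string.toList) then false
  else stringbeforeLoop string.toList indexof string.toList

-- ===== PORT B =====
def stringbefore_alt (string : String) (indexof : Int) : Bool :=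
  decide ('"' ∈ string.toList) && decide (((PySem.List.index? string.toList '"').getD 0 : Int) < indexof)

-- ===== PRECONDITION & SPEC =====
def Spec_stringbefore (string : String) (indexof : Int) (out : Bool) : Prop := out = stringbefore_alt string indexof
instance (string : String) (indexof : Int) (out : Bool) : Decidable (Spec_stringbefore string indexof out) := by unfold Spec_stringbefore; infer_instance

-- ===== CLAIM (what is proved, stated in full; the proofs are below) =====
def Claim_equal_stringbefore : Prop := ∀ (string : String) (indexof : Int), Dom_stringbefore string indexof → Spec_stringbefore string indexof (stringbefore string indexof)

-- ===== LEMMAS AND PROOFS =====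
lemma stringbeforeLoop_eq (full : List Char) (indexof : Int) (l : List Char) :
    stringbeforeLoop full indexof l =
      (decide ('"' ∈ l) && decide (((PySem.List.index? full '"').getD 0 : Int) < indexof)) := by
  induction l with
  | nil => simp [stringbeforeLoop]
  | cons c rest ih =>
      by_cases hc : c = '"'
      · subst hc
        by_cases hlt : ((PySem.List.index? full '"').getD 0 : Int) < indexof
        · simp only [PySem.List.index?_eq_idxOf?] at hlt ⊢
          simp [stringbeforeLoop, hlt]
        · simp only [PySem.List.index?_eq_idxOf?] at hlt ih ⊢
          simp [stringbeforeLoop, hlt, ih]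
      · have hc' : ¬ ('"' = c) := fun h => hc h.symm
        simp only [PySem.List.index?_eq_idxOf?] at ih ⊢
        simp [stringbeforeLoop, hc, hc', ih]

-- ===== VERDICT =====
theorem stringbefore_spec : Claim_equal_stringbefore := by
  intro string indexof _
  unfold Spec_stringbefore stringbefore stringbefore_alt
  by_cases hm : '"' ∈ string.toList
  · simp [hm, stringbeforeLoop_eq]
  · simp [hm]
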